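-- pv_equiv track=rewrite | github.com/aibba19/SR-BIM | pipeline_helpers.py | ids_from_udts
-- ===== SOURCE A (Python) =====
-- from typing import Dict, List, Optional, Tuple
--
-- def ids_from_udts(
--     udts: List[str],
--     all_objects: List[Tuple[int, str, str]]
-- ) -> Dict[str, List[int]]:
--     """
--     For each user‐defined type (UDT), return the list of object IDs whose
--     IFC type and name match.  A UDT is formatted like:
--        "<IfcType>_<name segments joined by '_'>"
--     whereas real object names use ':' to separate the last ID.
--     We normalize real names by replacing ':' with '_', then require that
--     all segments of the UDT after the first '_' appear in that normalized name.
--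
--     Args:
--       udts:        list of user‐defined types, e.g.
--                    "IfcBuildingElementProxy_Fire_Safety-..._EX-3002"
--       all_objects: list of tuples (id, ifc_type, name), where name is
--                    the DB string with colons, e.g.
--                    "Fire_Safety-...:EX-3002:323036"
--
--     Returns:
--       A dict mapping each UDT → list of matching object IDs.
--     """
--     mapping: Dict[str, List[int]] = {}
--     # Pre‐normalize all object names once
--     normalized = {
--         oid: o_name.replace(":", "_")
--         for oid, _, o_name in all_objects
--     }
--
--     for udt in udts:
--         # if the UDT is literally "any", treat as wildcard → all IDs
--         if udt.lower() == "any":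
--             mapping[udt] = [oid for oid, _, _ in all_objects]
--             continue
--
--         # Split off the ifc_type from the rest
--         if "_" not in udt:
--             mapping[udt] = []
--             continue
--         ifc_type, key = udt.split("_", 1)
--         # Break the key into segments that must all appear in the normalized name
--         segments = [seg for seg in key.split("_") if seg]
--
--         matched_ids: List[int] = []
--         for oid, o_ifc, _ in all_objects:
--             if o_ifc != ifc_type:
--                 continue
--             norm_name = normalized[oid]
--             # require all pieces to appear
--             if all(seg in norm_name for seg in segments):
--                 matched_ids.append(oid)
--
--         mapping[udt] = matched_ids
--
--     return mapping
-- ===== SOURCE B (Python) =====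
-- from typing import Dict, List, Tuple
--
--
-- def ids_from_udts(
--     udts: List[str],
--     all_objects: List[Tuple[int, str, str]]
-- ) -> Dict[str, List[int]]:
--     # One indexing pass: normalized names keyed by id (last wins, as in A's
--     # dict comprehension) and object ids grouped by their IFC type.
--     norm: Dict[int, str] = {}
--     by_type: Dict[str, List[int]] = {}
--     for oid, ifc, name in all_objects:
--         norm[oid] = name.replace(":", "_")
--         by_type.setdefault(ifc, []).append(oid)
--
--     def ids_for(udt: str) -> List[int]:
--         if udt.lower() == "any":
--             return [oid for oid, _, _ in all_objects]
--         if "_" not in udt: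
--             return []
--         ifc_type, key = udt.split("_", 1)
--         segments = [s for s in key.split("_") if s]
--         return [oid for oid in by_type.get(ifc_type, [])
--                 if all(s in norm[oid] for s in segments)]
--
--     # The value depends only on the UDT string, so the result dict is just the
--     # first-occurrence-deduplicated udts list mapped through ids_for.
--     return {udt: ids_for(udt) for udt in dict.fromkeys(udts)}
-- ===== Notes on version B (the rewrite author's own statement) =====
-- stated objective: faster
-- what changed: B builds, in one pass, a dict grouping object ids by ifc_type (plus the normalized-name dict), then maps the deduplicated udts list through a pure per-UDT lookup-and-filter, instead of A's per-UDT full scan of all objects accumulated by repeated dict insertion.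
import Mathlib
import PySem

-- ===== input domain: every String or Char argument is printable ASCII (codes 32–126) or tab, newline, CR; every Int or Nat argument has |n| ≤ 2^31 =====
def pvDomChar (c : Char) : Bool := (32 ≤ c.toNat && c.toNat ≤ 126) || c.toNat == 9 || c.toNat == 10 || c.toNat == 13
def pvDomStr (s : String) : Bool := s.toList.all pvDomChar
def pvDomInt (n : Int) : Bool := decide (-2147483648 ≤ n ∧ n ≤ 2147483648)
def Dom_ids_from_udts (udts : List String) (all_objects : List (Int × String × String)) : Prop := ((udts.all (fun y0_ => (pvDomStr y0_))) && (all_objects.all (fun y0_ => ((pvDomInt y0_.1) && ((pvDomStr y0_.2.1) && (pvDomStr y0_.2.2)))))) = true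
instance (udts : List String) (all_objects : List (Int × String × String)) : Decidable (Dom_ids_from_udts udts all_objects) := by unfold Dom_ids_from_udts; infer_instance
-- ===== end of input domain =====

-- B indexes the objects once (ids grouped by ifc_type, normalized names by id) and maps the
-- deduplicated udts list through a per-UDT lookup-and-filter, instead of A's per-UDT full scan
-- folded into a dict (objective: faster — each UDT touches only its own type's objects).


-- ===== PORT A =====
-- normalized = {oid: o_name.replace(":", "_") for oid, _, o_name in all_objects}
def pvNormA (all_objects : List (Int × String × String)) : PySem.Dict Int String :=
  all_objects.foldl (fun d o => d.insert o.1 (PySem.Str.replace o.2.2 ":" "_")) PySem.Dict.empty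

def ids_from_udts (udts : List String) (all_objects : List (Int × String × String)) : List (String × List Int) :=
  (udts.foldl (fun mapping udt =>
    if PySem.Str.lower udt == "any" then
      mapping.insert udt (all_objects.map (·.1))
    else if PySem.Str.isIn "_" udt = false then
      mapping.insert udt []
    else
      -- ifc_type, key = udt.split("_", 1): "_" ∈ udt gives exactly two parts
      let parts := (PySem.Str.splitMax? udt "_" 1).getD []
      let ifc_type := parts.headD ""
      let key := (parts.drop 1).headD ""
      let segments := ((PySem.Str.split? key "_").getD []).filter (fun seg => seg != "")
      let matched_ids := all_objects.foldl (fun acc o =>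
        if o.2.1 != ifc_type then acc
        else if segments.all (fun seg => PySem.Str.isIn seg (((pvNormA all_objects).get? o.1).getD "")) then
          acc ++ [o.1]
        else acc) []
      mapping.insert udt matched_ids
    ) PySem.Dict.empty).items

-- ===== PORT B =====
-- one loop: norm[oid] = name.replace(":", "_"); by_type.setdefault(ifc, []).append(oid)
def pvIndexB (all_objects : List (Int × String × String)) :
    PySem.Dict Int String × PySem.Dict String (List Int) :=
  all_objects.foldl
    (fun p o => (p.1.insert o.1 (PySem.Str.replace o.2.2 ":" "_"),
                 p.2.modify o.2.1 [] (· ++ [o.1])))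
    (PySem.Dict.empty, PySem.Dict.empty)

-- def ids_for(udt)
def pvIdsFor (all_objects : List (Int × String × String)) (norm : PySem.Dict Int String)
    (byType : PySem.Dict String (List Int)) (udt : String) : List Int :=
  if PySem.Str.lower udt == "any" then all_objects.map (·.1)
  else if PySem.Str.isIn "_" udt = false then []
  else
    let parts := (PySem.Str.splitMax? udt "_" 1).getD []
    let ifc_type := parts.headD ""
    let key := (parts.drop 1).headD ""
    let segments := ((PySem.Str.split? key "_").getD []).filter (fun seg => seg != "")
    (byType.getD ifc_type []).filter
      (fun oid => segments.all (fun seg => PySem.Str.isIn seg ((norm.get? oid).getD "")))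

-- {udt: ids_for(udt) for udt in dict.fromkeys(udts)}
def ids_from_udts_alt (udts : List String) (all_objects : List (Int × String × String)) : List (String × List Int) :=
  let idx := pvIndexB all_objects
  (PySem.List.dedup udts).map (fun udt => (udt, pvIdsFor all_objects idx.1 idx.2 udt))

-- ===== PRECONDITION & SPEC =====
def Spec_ids_from_udts (udts : List String) (all_objects : List (Int × String × String)) (out : List (String × List Int)) : Prop := out = ids_from_udts_alt udts all_objects
instance (udts : List String) (all_objects : List (Int × String × String)) (out : List (String × List Int)) : Decidable (Spec_ids_from_udts udts all_objects out) := by unfold Spec_ids_from_udts; infer_instance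

-- ===== CLAIM (what is proved, stated in full; the proofs are below) =====
def Claim_equal_ids_from_udts : Prop := ∀ (udts : List String) (all_objects : List (Int × String × String)), Dom_ids_from_udts udts all_objects → Spec_ids_from_udts udts all_objects (ids_from_udts udts all_objects)

-- ===== LEMMAS AND PROOFS =====

-- the value A stores for one udt (A's fold body is insert of this value)
def pvValA (all_objects : List (Int × String × String)) (udt : String) : List Int :=
  if PySem.Str.lower udt == "any" then all_objects.map (·.1)
  else if PySem.Str.isIn "_" udt = false then []
  else
    let parts := (PySem.Str.splitMax? udt "_" 1).getD []
    let ifc_type := parts.headD ""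
    let key := (parts.drop 1).headD ""
    let segments := ((PySem.Str.split? key "_").getD []).filter (fun seg => seg != "")
    all_objects.foldl (fun acc o =>
      if o.2.1 != ifc_type then acc
      else if segments.all (fun seg => PySem.Str.isIn seg (((pvNormA all_objects).get? o.1).getD "")) then
        acc ++ [o.1]
      else acc) []

-- items of a dict built by inserting a key-determined value for each list element
theorem pv_items_foldl_insert_fun {κ ν : Type} [DecidableEq κ] (f : κ → ν) (l : List κ) :
    (l.foldl (fun d u => d.insert u (f u)) PySem.Dict.empty).items
      = (PySem.List.dedup l).map (fun u => (u, f u)) := by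
  induction l using List.reverseRecOn with
  | nil => rfl
  | append_singleton xs x ih =>
      rw [List.foldl_append, List.foldl_cons, List.foldl_nil,
        PySem.Dict.items_insert, ih]
      have hkeys : (xs.foldl (fun d u => d.insert u (f u)) PySem.Dict.empty).keys
          = PySem.Set.ofList xs := by
        rw [PySem.Dict.keys_foldl_insert]
        simp [PySem.Dict.keys_empty, PySem.Set.update_nil_left]
      rw [PySem.Dict.contains_eq_decide_mem_keys, hkeys,
        PySem.List.dedup_eq_ofList, PySem.List.dedup_eq_ofList,
        PySem.Set.ofList_append_singleton, PySem.Set.add]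
      by_cases hx : x ∈ PySem.Set.ofList xs
      · rw [if_pos (by simp [hx]), if_pos (by simp [PySem.Set.contains, hx]), List.map_map]
        refine List.map_congr_left (fun u hu => ?_)
        by_cases hux : u = x
        · simp [Function.comp, hux]
        · simp [Function.comp, hux]
      · rw [if_neg (by simp [hx]), if_neg (by simp [PySem.Set.contains, hx]),
          List.map_append, List.map_cons, List.map_nil]

-- the two independent accumulators of B's indexing pass, separated
theorem pvIndexB_fst (all_objects : List (Int × String × String)) :
    (pvIndexB all_objects).1 = pvNormA all_objects := by
  unfold pvIndexB pvNormA
  rw [PySem.List.foldl_prod_mk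
    (fun (d : PySem.Dict Int String) (o : Int × String × String) => d.insert o.1 (PySem.Str.replace o.2.2 ":" "_"))
    (fun (d : PySem.Dict String (List Int)) (o : Int × String × String) => d.modify o.2.1 [] (· ++ [o.1]))]

-- B's group for a type is exactly the ids of the objects of that type, in order
theorem pvIndexB_getD (all_objects : List (Int × String × String)) (t : String) :
    (pvIndexB all_objects).2.getD t []
      = (all_objects.filter (fun o => o.2.1 == t)).map (·.1) := by
  unfold pvIndexB
  rw [PySem.List.foldl_prod_mk
    (fun (d : PySem.Dict Int String) (o : Int × String × String) => d.insert o.1 (PySem.Str.replace o.2.2 ":" "_"))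
    (fun (d : PySem.Dict String (List Int)) (o : Int × String × String) => d.modify o.2.1 [] (· ++ [o.1]))]
  have : (all_objects.foldl (fun d (o : Int × String × String) =>
      d.modify o.2.1 [] (· ++ [o.1])) PySem.Dict.empty)
      = ((all_objects.map (fun o => (o.2.1, o.1))).foldl
          (fun d p => d.modify p.1 [] (· ++ [p.2])) PySem.Dict.empty) := by
    rw [List.foldl_map]
  rw [this, PySem.Dict.getD_foldl_modify_append]
  simp [PySem.Dict.getD_empty, List.filter_map, Function.comp_def]

-- A's inner scan over all objects equals a filter over the ids of that type
theorem pvInner_eq (all_objects : List (Int × String × String)) (t : String)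
    (pred : Int → Bool) :
    all_objects.foldl (fun acc o =>
        if o.2.1 != t then acc
        else if pred o.1 then acc ++ [o.1] else acc) []
      = ((all_objects.filter (fun o => o.2.1 == t)).map (·.1)).filter pred := by
  induction all_objects using List.reverseRecOn with
  | nil => rfl
  | append_singleton xs x ih =>
      simp only [List.foldl_append, List.foldl_cons, List.foldl_nil,
        List.filter_append, List.map_append, ih]
      by_cases h : x.2.1 = t
      · by_cases hp : pred x.1 <;> simp [h, hp]
      · simp [h, bne_iff_ne]

-- A's per-udt value equals B's per-udt value
theorem pvValA_eq_pvIdsFor (all_objects : List (Int × String × String)) (udt : String) :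
    pvValA all_objects udt
      = pvIdsFor all_objects (pvIndexB all_objects).1 (pvIndexB all_objects).2 udt := by
  unfold pvValA pvIdsFor
  by_cases h1 : (PySem.Str.lower udt == "any") = true
  · rw [if_pos h1, if_pos h1]
  · rw [if_neg h1, if_neg h1]
    by_cases h2 : PySem.Str.isIn "_" udt = false
    · rw [if_pos h2, if_pos h2]
    · rw [if_neg h2, if_neg h2]
      simp only [pvIndexB_fst, pvIndexB_getD]
      exact pvInner_eq all_objects (((PySem.Str.splitMax? udt "_" 1).getD []).headD "")
        (fun oid => (((PySem.Str.split? ((((PySem.Str.splitMax? udt "_" 1).getD []).drop 1).headD "") "_").getD []).filter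
            (fun seg => seg != "")).all
          (fun seg => PySem.Str.isIn seg (((pvNormA all_objects).get? oid).getD "")))

-- ===== VERDICT (by name: the statement is the Claim_ definition above) =====
theorem ids_from_udts_spec : Claim_equal_ids_from_udts := by
  intro udts all_objects _
  unfold Spec_ids_from_udts ids_from_udts ids_from_udts_alt
  have hbody : (fun (mapping : PySem.Dict String (List Int)) udt =>
      if PySem.Str.lower udt == "any" then
        mapping.insert udt (all_objects.map (·.1))
      else if PySem.Str.isIn "_" udt = false then
        mapping.insert udt []
      else
        let parts := (PySem.Str.splitMax? udt "_" 1).getD []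
        let ifc_type := parts.headD ""
        let key := (parts.drop 1).headD ""
        let segments := ((PySem.Str.split? key "_").getD []).filter (fun seg => seg != "")
        let matched_ids := all_objects.foldl (fun acc o =>
          if o.2.1 != ifc_type then acc
          else if segments.all (fun seg => PySem.Str.isIn seg (((pvNormA all_objects).get? o.1).getD "")) then
            acc ++ [o.1]
          else acc) []
        mapping.insert udt matched_ids)
      = (fun (mapping : PySem.Dict String (List Int)) udt =>
          mapping.insert udt (pvValA all_objects udt)) := by
    funext mapping udt
    unfold pvValA
    by_cases h1 : (PySem.Str.lower udt == "any") = true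
    · rw [if_pos h1, if_pos h1]
    · rw [if_neg h1, if_neg h1]
      by_cases h2 : PySem.Str.isIn "_" udt = false
      · rw [if_pos h2, if_pos h2]
      · rw [if_neg h2, if_neg h2]
  rw [hbody, pv_items_foldl_insert_fun]
  exact List.map_congr_left (fun u _ => by rw [pvValA_eq_pvIdsFor])
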